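-- pv_equiv track=rewrite | github.com/MatisseAD/lazaristes | chapitre5.py | prix_decoupe
-- ===== SOURCE A (Python) =====
-- def prix_decoupe(d,p):
--     n = len(p) - 1
--     assert len(d) == n - 1
--
--     total = 0
--     longueur = 1
--
--
--     for i in range(n - 1):
--         if d[i]:
--             total += p[longueur]
--             longueur = 1
--         else:
--             longueur += 1
--
--
--     total += p[longueur]
--     return total
-- ===== SOURCE B (Python) =====
-- def prix_decoupe(d, p):
--     n = len(p) - 1
--     assert len(d) == n - 1
--     cuts = [i for i in range(n - 1) if d[i]]
--     bounds = [-1] + cuts + [n - 1]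
--     return sum(p[bounds[i + 1] - bounds[i]] for i in range(len(bounds) - 1))
-- ===== Notes on version B (the rewrite author's own statement) =====
-- stated objective: alternative
-- what changed: Replaces A's running-length accumulator with per-cut reset by collecting the cut indices, framing them with -1 and n-1 as boundaries, and summing prices indexed by consecutive boundary differences.
import Mathlib
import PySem

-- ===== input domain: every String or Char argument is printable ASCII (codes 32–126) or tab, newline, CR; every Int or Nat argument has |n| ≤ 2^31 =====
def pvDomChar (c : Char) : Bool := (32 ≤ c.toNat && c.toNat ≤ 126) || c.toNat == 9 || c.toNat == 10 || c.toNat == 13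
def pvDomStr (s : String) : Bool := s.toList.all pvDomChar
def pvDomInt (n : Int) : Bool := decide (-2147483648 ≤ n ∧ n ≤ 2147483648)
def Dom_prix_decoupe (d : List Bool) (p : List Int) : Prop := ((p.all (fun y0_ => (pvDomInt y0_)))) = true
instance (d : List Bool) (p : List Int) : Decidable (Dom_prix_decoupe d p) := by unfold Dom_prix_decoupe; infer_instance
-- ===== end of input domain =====

-- B replaces A's running-length accumulator (reset at each cut) by the list of cut
-- indices framed by -1 and n-1, summing prices at consecutive boundary differences
-- (alternative decomposition, same O(n) cost).

-- ===== PORT A =====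
-- step of A's loop body: state (total, longueur), input d[i]
def pvStepA (p : List Int) (s : Int × Int) (b : Bool) : Int × Int :=
  if b then (s.1 + PySem.List.pyGetD p s.2 0, 1) else (s.1, s.2 + 1)

def prix_decoupe (d : List Bool) (p : List Int) : Int :=
  let n : Int := (p.length : Int) - 1
  let st := (PySem.List.pyRange 0 (n - 1) 1).foldl
    (fun s i => pvStepA p s (PySem.List.pyGetD d i false)) (0, 1)
  st.1 + PySem.List.pyGetD p st.2 0

-- ===== PORT B =====
def prix_decoupe_alt (d : List Bool) (p : List Int) : Int :=
  let n : Int := (p.length : Int) - 1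
  let cuts := (PySem.List.pyRange 0 (n - 1) 1).filter (fun i => PySem.List.pyGetD d i false)
  let bounds := -1 :: (cuts ++ [n - 1])
  ((PySem.List.pyRange 0 ((bounds.length : Int) - 1) 1).map
    (fun i => PySem.List.pyGetD p
      (PySem.List.pyGetD bounds (i + 1) 0 - PySem.List.pyGetD bounds i 0) 0)).sum

-- ===== PRECONDITION & SPEC =====
-- Pre: exactly A's assert 'len(d) == len(p) - 2' (A raises AssertionError otherwise)
def Pre_prix_decoupe (d : List Bool) (p : List Int) : Prop :=
  (d.length : Int) = (p.length : Int) - 2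
instance (d : List Bool) (p : List Int) : Decidable (Pre_prix_decoupe d p) := by
  unfold Pre_prix_decoupe; infer_instance

def pvWitness_prix_decoupe : List Bool × List Int := ([true, false, true], [7, 3, 1, 4, 5])

def Spec_prix_decoupe (d : List Bool) (p : List Int) (out : Int) : Prop := out = prix_decoupe_alt d p
instance (d : List Bool) (p : List Int) (out : Int) : Decidable (Spec_prix_decoupe d p out) := by unfold Spec_prix_decoupe; infer_instance

-- ===== CLAIM (what is proved, stated in full; the proofs are below) =====
def Claim_equal_prix_decoupe : Prop := ∀ (d : List Bool) (p : List Int), Dom_prix_decoupe d p → Pre_prix_decoupe d p → Spec_prix_decoupe d p (prix_decoupe d p)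

-- ===== LEMMAS AND PROOFS =====

-- A's loop, structurally over the list d
def pvFA (p : List Int) : List Bool → Int → Int
  | [], l => PySem.List.pyGetD p l 0
  | b :: rest, l =>
      if b then PySem.List.pyGetD p l 0 + pvFA p rest 1 else pvFA p rest (l + 1)

-- sum of prices at consecutive differences of lo :: rest
def pvD (p : List Int) : Int → List Int → Int
  | _, [] => 0
  | lo, x :: r => PySem.List.pyGetD p (x - lo) 0 + pvD p x r

lemma pvFoldA_eq (p : List Int) (d : List Bool) :
    ∀ (t l : Int), (d.foldl (pvStepA p) (t, l)).1 +
      PySem.List.pyGetD p (d.foldl (pvStepA p) (t, l)).2 0 = t + pvFA p d l := by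
  induction d with
  | nil => intro t l; simp [pvFA]
  | cons b rest ih =>
    intro t l
    cases b <;> simp [pvStepA, pvFA, ih, add_assoc]

lemma pvD_shift (p : List Int) (r : List Int) :
    ∀ lo : Int, pvD p (lo + 1) (r.map (· + 1)) = pvD p lo r := by
  induction r with
  | nil => intro lo; simp [pvD]
  | cons x r ih =>
    intro lo
    simp only [List.map_cons, pvD]
    rw [ih x]
    congr 2
    ring

def pvCutsOf (d : List Bool) : List Int :=
  (PySem.List.pyRange 0 (d.length : Int) 1).filter (fun i => PySem.List.pyGetD d i false)

lemma pvGetD_cons_succ_nat (b : Bool) (rest : List Bool) (n : Nat) :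
    PySem.List.pyGetD (b :: rest) ((n : Int) + 1) false = PySem.List.pyGetD rest (n : Int) false := by
  have e : ((n : Int) + 1) = ((n + 1 : Nat) : Int) := by push_cast; ring
  rw [e, PySem.List.pyGetD_natCast, PySem.List.pyGetD_natCast]
  simp [List.getD]

lemma pvRange_succ_map (m : Nat) :
    PySem.List.pyRange 0 ((m : Int) + 1) 1 =
      0 :: (PySem.List.pyRange 0 (m : Int) 1).map (· + 1) := by
  rw [PySem.List.pyRange_one_cons (by omega)]
  congr 1
  rw [PySem.List.pyRange_one, PySem.List.pyRange_one]
  simp [List.map_map, Function.comp_def]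
  intro a _
  ring

lemma pvCutsOf_cons (b : Bool) (rest : List Bool) :
    pvCutsOf (b :: rest) =
      (if b then [0] else []) ++ (pvCutsOf rest).map (· + 1) := by
  unfold pvCutsOf
  have h1 : ((b :: rest).length : Int) = ((rest.length : Int)) + 1 := by simp
  rw [h1, pvRange_succ_map, List.filter_cons, List.filter_map]
  simp only [Function.comp_def]
  have h4 : (PySem.List.pyRange 0 (rest.length : Int) 1).filter
        (fun k => PySem.List.pyGetD (b :: rest) (k + 1) false) =
      (PySem.List.pyRange 0 (rest.length : Int) 1).filter
        (fun k => PySem.List.pyGetD rest k false) := by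
    apply List.filter_congr
    intro k hk
    rw [PySem.List.mem_pyRange_one] at hk
    obtain ⟨n, rfl⟩ := Int.eq_ofNat_of_zero_le hk.1
    rw [pvGetD_cons_succ_nat]
  rw [h4]
  have hb : PySem.List.pyGetD (b :: rest) 0 false = b := by
    simp [PySem.List.pyGetD_zero_cons]
  rw [hb]
  cases b <;> simp

lemma pvFA_eq_pvD (p : List Int) (d : List Bool) :
    ∀ l : Int, pvFA p d l = pvD p (-l) (pvCutsOf d ++ [(d.length : Int)]) := by
  induction d with
  | nil =>
    intro l
    simp [pvFA, pvCutsOf, PySem.List.pyRange_one_eq_nil, pvD]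
  | cons b rest ih =>
    intro l
    rw [pvCutsOf_cons]
    have hlen : (((b :: rest).length : Int)) = ((rest.length : Int)) + 1 := by simp
    rw [hlen]
    have hmap : (pvCutsOf rest).map (· + 1) ++ [(rest.length : Int) + 1] =
        ((pvCutsOf rest) ++ [(rest.length : Int)]).map (· + 1) := by simp
    cases b with
    | true =>
      simp only [pvFA, if_true, List.cons_append, List.nil_append, hmap, pvD]
      rw [ih 1]
      have h0 : (0 : Int) - (-l) = l := by ring
      rw [h0]
      congr 1
      exact ((by simpa using pvD_shift p ((pvCutsOf rest) ++ [(rest.length : Int)]) (-1)) :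
        pvD p 0 (((pvCutsOf rest) ++ [(rest.length : Int)]).map (· + 1)) =
          pvD p (-1) ((pvCutsOf rest) ++ [(rest.length : Int)])).symm
    | false =>
      simp only [pvFA, Bool.false_eq_true, if_false, List.nil_append, hmap]
      rw [ih (l + 1)]
      have := pvD_shift p ((pvCutsOf rest) ++ [(rest.length : Int)]) (-(l + 1))
      have h5 : -(l + 1) + 1 = -l := by ring
      rw [h5] at this
      rw [this]

lemma pvSumRange (p : List Int) (rest : List Int) :
    ∀ lo : Int,
      ((PySem.List.pyRange 0 ((rest.length : Int)) 1).map
        (fun i => PySem.List.pyGetD p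
          (PySem.List.pyGetD (lo :: rest) (i + 1) 0 - PySem.List.pyGetD (lo :: rest) i 0) 0)).sum
      = pvD p lo rest := by
  induction rest with
  | nil => intro lo; simp [pvD, PySem.List.pyRange_one_eq_nil]
  | cons x r ih =>
    intro lo
    have hlen : (((x :: r).length : Int)) = ((r.length : Int)) + 1 := by simp
    rw [hlen, pvRange_succ_map, List.map_cons, List.map_map, List.sum_cons]
    simp only [Function.comp_def]
    have hgetsucc : ∀ (ys : List Int) (y : Int) (n : Nat),
        PySem.List.pyGetD (y :: ys) ((n : Int) + 1) 0 = PySem.List.pyGetD ys (n : Int) 0 := by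
      intro ys y n
      have e : ((n : Int) + 1) = ((n + 1 : Nat) : Int) := by push_cast; ring
      rw [e, PySem.List.pyGetD_natCast, PySem.List.pyGetD_natCast]
      simp [List.getD]
    have hmapeq : (PySem.List.pyRange 0 ((r.length : Int)) 1).map
          (fun i => PySem.List.pyGetD p
            (PySem.List.pyGetD (lo :: x :: r) ((i + 1) + 1) 0 -
             PySem.List.pyGetD (lo :: x :: r) (i + 1) 0) 0) =
        (PySem.List.pyRange 0 ((r.length : Int)) 1).map
          (fun i => PySem.List.pyGetD p
            (PySem.List.pyGetD (x :: r) (i + 1) 0 - PySem.List.pyGetD (x :: r) i 0) 0) := by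
      apply List.map_congr_left
      intro i hi
      rw [PySem.List.mem_pyRange_one] at hi
      obtain ⟨n, rfl⟩ := Int.eq_ofNat_of_zero_le hi.1
      have e : ((n : Int) + 1 + 1) = (((n + 1 : Nat) : Int)) + 1 := by push_cast; ring
      rw [e, hgetsucc (x :: r) lo (n + 1), hgetsucc (x :: r) lo n]
      push_cast
      rfl
    rw [hmapeq, ih x]
    have hh1 : PySem.List.pyGetD (lo :: x :: r) (0 + 1) 0 = x := by
      have := hgetsucc (x :: r) lo 0
      simpa using this
    have hh0 : PySem.List.pyGetD (lo :: x :: r) 0 0 = lo := by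
      simp [PySem.List.pyGetD_zero_cons]
    rw [hh1, hh0]
    rfl

-- ===== VERDICT (by name: the statement is the Claim_ definition above) =====
theorem prix_decoupe_spec : Claim_equal_prix_decoupe := by
  intro d p _ hpre
  unfold Spec_prix_decoupe prix_decoupe prix_decoupe_alt Pre_prix_decoupe at *
  have hn : (p.length : Int) - 1 - 1 = (d.length : Int) := by omega
  simp only [hn]
  have hA := PySem.List.foldl_pyRange_zero_pyGetD' d false (pvStepA p) ((0 : Int), (1 : Int))
  rw [hA, pvFoldA_eq p d 0 1, pvFA_eq_pvD p d 1, zero_add]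
  have hcuts : (PySem.List.pyRange 0 (d.length : Int) 1).filter
      (fun i => PySem.List.pyGetD d i false) = pvCutsOf d := rfl
  rw [hcuts]
  have hlen : (((-1 : Int) :: (pvCutsOf d ++ [(d.length : Int)])).length : Int) - 1 =
      (((pvCutsOf d ++ [(d.length : Int)]).length : Int)) := by
    simp
  rw [hlen, pvSumRange p (pvCutsOf d ++ [(d.length : Int)]) (-1)]
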